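-- pv_equiv track=rewrite | github.com/ani-tiwary/markov-text-gen | main.py | count_continuations
-- ===== SOURCE A (Python) =====
-- from collections import defaultdict
--
-- def count_continuations(text, n):
--     """Count how many different words can follow each (n-1)-gram"""
--     continuations = defaultdict(int)
--     seen_contexts = defaultdict(set)
--
--     for i in range(len(text) - n + 1):
--         context = tuple(text[i:i+n-1])
--         next_word = text[i+n-1]
--         seen_contexts[context].add(next_word)
--
--     for context, words in seen_contexts.items():
--         continuations[context] = len(words)
--
--     return continuations
-- ===== SOURCE B (Python) =====
-- from collections import defaultdict
--
-- def count_continuations(text, n):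
--     """Count how many different words can follow each (n-1)-gram"""
--     result = defaultdict(int)
--     seen = set()
--     for i in range(len(text) - n + 1):
--         pair = (tuple(text[i:i+n-1]), text[i+n-1])
--         if pair not in seen:
--             seen.add(pair)
--             result[pair[0]] += 1
--     return result
-- ===== Notes on version B (the rewrite author's own statement) =====
-- stated objective: alternative
-- what changed: Replaces A's dict-of-sets grouping followed by a second length-taking pass with a single streaming pass that keeps one flat set of (context, next_word) pairs and bumps a counter the first time each pair is seen.
import Mathlib
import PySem

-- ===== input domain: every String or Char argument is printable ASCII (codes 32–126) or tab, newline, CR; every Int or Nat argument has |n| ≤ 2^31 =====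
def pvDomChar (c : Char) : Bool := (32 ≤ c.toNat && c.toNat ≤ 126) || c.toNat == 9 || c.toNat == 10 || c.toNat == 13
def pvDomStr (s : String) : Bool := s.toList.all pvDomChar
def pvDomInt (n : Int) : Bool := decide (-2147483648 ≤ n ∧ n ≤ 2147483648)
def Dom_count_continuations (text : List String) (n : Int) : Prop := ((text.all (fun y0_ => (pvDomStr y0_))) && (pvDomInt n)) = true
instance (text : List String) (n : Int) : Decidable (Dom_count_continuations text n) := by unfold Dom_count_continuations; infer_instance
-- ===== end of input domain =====

-- B replaces A's dict-of-sets grouping + second length pass with one streaming pass over a flat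
-- set of (context, next_word) pairs and a running counter (alternative structure, similar cost).


-- ===== PORT A =====
-- text[i+n-1] is ported as pyGetD with default "": exact wherever Python A returns
-- (Pre_ guarantees every such index is a valid Python index, possibly negative).
def count_continuations (text : List String) (n : Int) : List (List String × Int) :=
  let seen_contexts :=
    (PySem.List.pyRange 0 ((text.length : Int) - n + 1) 1).foldl
      (fun (d : PySem.Dict (List String) (PySem.Set String)) i =>
        let context := PySem.List.slice text (some i) (some (i + n - 1))
        let next_word := PySem.List.pyGetD text (i + n - 1) ""
        d.modify context PySem.Set.empty (fun s => PySem.Set.add s next_word))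
      PySem.Dict.empty
  let continuations :=
    seen_contexts.items.foldl
      (fun (d : PySem.Dict (List String) Int) cw => d.insert cw.1 ((cw.2.length : Int)))
      PySem.Dict.empty
  continuations.items

-- ===== PORT B =====
def count_continuations_alt (text : List String) (n : Int) : List (List String × Int) :=
  let st :=
    (PySem.List.pyRange 0 ((text.length : Int) - n + 1) 1).foldl
      (fun (st : PySem.Set (List String × String) × PySem.Dict (List String) Int) i =>
        let pair := (PySem.List.slice text (some i) (some (i + n - 1)), PySem.List.pyGetD text (i + n - 1) "")
        if PySem.Set.contains st.1 pair then st
        else (PySem.Set.add st.1 pair, st.2.modify pair.1 0 (· + 1)))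
      (PySem.Set.empty, PySem.Dict.empty)
  st.2.items

-- ===== PRECONDITION & SPEC =====
-- Pre_ excludes exactly the inputs where Python A raises IndexError (text[i+n-1] with n ≤ 0
-- reaching below -len(text)); both A and B raise there, nothing A returns on is excluded.
def Pre_count_continuations (text : List String) (n : Int) : Prop :=
  1 ≤ n ∨ 1 - n ≤ (text.length : Int)
instance (text : List String) (n : Int) : Decidable (Pre_count_continuations text n) := by
  unfold Pre_count_continuations; infer_instance

def pvWitness_count_continuations : List String × Int := (["a", "b", "a", "c"], 2)

def Spec_count_continuations (text : List String) (n : Int) (out : List (List String × Int)) : Prop := out = count_continuations_alt text n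
instance (text : List String) (n : Int) (out : List (List String × Int)) : Decidable (Spec_count_continuations text n out) := by unfold Spec_count_continuations; infer_instance

-- ===== CLAIM (what is proved, stated in full; the proofs are below) =====
def Claim_equal_count_continuations : Prop := ∀ (text : List String) (n : Int), Dom_count_continuations text n → Pre_count_continuations text n → Spec_count_continuations text n (count_continuations text n)

-- ===== LEMMAS AND PROOFS =====
-- proof-only helpers: the common pair list both loops traverse, the two loop bodies, and
-- the subsequence of first-occurrence pairs on which B's counter fires
def pvPair (text : List String) (n : Int) (i : Int) : List String × String :=
  (PySem.List.slice text (some i) (some (i + n - 1)), PySem.List.pyGetD text (i + n - 1) "")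

def pvL (text : List String) (n : Int) : List (List String × String) :=
  (PySem.List.pyRange 0 ((text.length : Int) - n + 1) 1).map (pvPair text n)

def pvStepA (d : PySem.Dict (List String) (PySem.Set String)) (p : List String × String) :
    PySem.Dict (List String) (PySem.Set String) :=
  d.modify p.1 PySem.Set.empty (fun s => PySem.Set.add s p.2)

def pvStepB (st : PySem.Set (List String × String) × PySem.Dict (List String) Int)
    (p : List String × String) :
    PySem.Set (List String × String) × PySem.Dict (List String) Int :=
  if PySem.Set.contains st.1 p then st else (PySem.Set.add st.1 p, st.2.modify p.1 0 (· + 1))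

def pvNews : List (List String × String) → PySem.Set (List String × String) → List (List String × String)
  | [], _ => []
  | p :: P, s => if PySem.Set.contains s p then pvNews P s else p :: pvNews P (PySem.Set.add s p)

theorem pv_add_of_contains {α : Type} [BEq α] (s : PySem.Set α) (x : α)
    (h : PySem.Set.contains s x = true) : PySem.Set.add s x = s := by
  simp only [PySem.Set.add, PySem.Set.contains_eq_listContains] at *
  simp [h]

theorem pv_add_of_not_contains {α : Type} [BEq α] (s : PySem.Set α) (x : α)
    (h : ¬ PySem.Set.contains s x = true) : PySem.Set.add s x = s ++ [x] := by
  rw [Bool.not_eq_true] at h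
  simp only [PySem.Set.add, PySem.Set.contains_eq_listContains] at *
  simp [h]

theorem pv_add_of_mem {α : Type} [BEq α] [LawfulBEq α] (s : PySem.Set α) (x : α)
    (h : x ∈ s) : PySem.Set.add s x = s :=
  pv_add_of_contains s x ((PySem.Set.contains_iff s x).mpr h)

theorem pv_add_of_not_mem {α : Type} [BEq α] [LawfulBEq α] (s : PySem.Set α) (x : α)
    (h : ¬ x ∈ s) : PySem.Set.add s x = s ++ [x] :=
  pv_add_of_not_contains s x (fun hc => h ((PySem.Set.contains_iff s x).mp hc))

theorem pv_ofList_snoc {α : Type} [BEq α] (A : List α) (x : α) :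
    PySem.Set.ofList (A ++ [x]) = PySem.Set.add (PySem.Set.ofList A) x := by
  simp [PySem.Set.ofList_eq_foldl, List.foldl_append]

theorem pv_getD_GA (P : List (List String × String)) (d : PySem.Dict (List String) (PySem.Set String))
    (c : List String) :
    (P.foldl pvStepA d).getD c PySem.Set.empty
      = PySem.Set.update (d.getD c PySem.Set.empty) ((P.filter (fun p => p.1 == c)).map Prod.snd) := by
  induction P generalizing d with
  | nil => simp [PySem.Set.update]
  | cons p P ih =>
    simp only [List.foldl_cons, List.filter_cons]
    rw [ih]
    by_cases h : p.1 = c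
    · have hstep : (pvStepA d p).getD c PySem.Set.empty
          = PySem.Set.add (d.getD c PySem.Set.empty) p.2 := by
        rw [pvStepA, PySem.Dict.getD_modify, if_pos h.symm, h]
      rw [hstep]
      simp only [h, beq_self_eq_true, if_pos, List.map_cons]
      rfl
    · have hb : (p.1 == c) = false := beq_eq_false_iff_ne.mpr h
      rw [hb]
      have hstep : (pvStepA d p).getD c PySem.Set.empty = d.getD c PySem.Set.empty := by
        rw [pvStepA, PySem.Dict.getD_modify, if_neg (fun hc => h hc.symm)]
      rw [hstep]
      simp

theorem pv_A_items (text : List String) (n : Int) :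
    count_continuations text n
      = (PySem.Set.ofList ((pvL text n).map Prod.fst)).map
          (fun c => (c, ((PySem.Set.ofList (((pvL text n).filter (fun p => p.1 == c)).map Prod.snd)).length : Int))) := by
  show ((((PySem.List.pyRange 0 ((text.length : Int) - n + 1) 1).foldl
      (fun d i => pvStepA d (pvPair text n i)) PySem.Dict.empty)).items.foldl
      (fun (d : PySem.Dict (List String) Int) cw => d.insert cw.1 ((cw.2.length : Int)))
      PySem.Dict.empty).items = _
  rw [← List.foldl_map (f := pvPair text n) (g := pvStepA) (init := PySem.Dict.empty)]
  rw [show (PySem.List.pyRange 0 ((text.length : Int) - n + 1) 1).map (pvPair text n) = pvL text n from rfl]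
  set GA := (pvL text n).foldl pvStepA PySem.Dict.empty with hGA
  have hkeys : GA.keys = PySem.Set.ofList ((pvL text n).map Prod.fst) := by
    have := PySem.Dict.keys_foldl_modify_key (pvL text n) Prod.fst PySem.Set.empty
      (fun _ p s => PySem.Set.add s p.2) PySem.Dict.empty
    simpa [PySem.Set.ofList_eq_foldl, PySem.Set.update] using this
  have hnd : GA.keys.Nodup := by
    rw [hkeys]; exact PySem.Set.nodup_ofList _
  have hitems := PySem.Dict.items_eq_map_keys GA hnd PySem.Set.empty
  have hfresh := PySem.Dict.items_foldl_insert_fresh GA.items Prod.fst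
    (fun cw => ((cw.2.length : Int))) PySem.Dict.empty
    (fun a _ => PySem.Dict.contains_empty _) (by exact hnd)
  rw [hfresh]
  simp only [PySem.Dict.empty, List.nil_append]
  rw [hitems, List.map_map, hkeys]
  refine List.map_congr_left (fun c _ => ?_)
  simp only [Function.comp]
  rw [hGA, pv_getD_GA]
  simp [PySem.Set.update, PySem.Set.ofList_eq_foldl, PySem.Dict.getD_empty]

theorem pv_B_split (P : List (List String × String)) (s : PySem.Set (List String × String))
    (d : PySem.Dict (List String) Int) :
    P.foldl pvStepB (s, d)
      = (PySem.Set.update s P, (pvNews P s).foldl (fun d p => d.modify p.1 0 (· + 1)) d) := by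
  induction P generalizing s d with
  | nil => rfl
  | cons p P ih =>
    simp only [List.foldl_cons, pvNews, pvStepB, PySem.Set.update]
    by_cases h : PySem.Set.contains s p = true
    · rw [if_pos h, if_pos h, ih, pv_add_of_contains s p h]
      rfl
    · rw [if_neg h, if_neg h, ih]
      rfl

theorem pv_update_eq_append_news (P : List (List String × String)) (s : PySem.Set (List String × String)) :
    PySem.Set.update s P = s ++ pvNews P s := by
  induction P generalizing s with
  | nil => simp [pvNews, PySem.Set.update]
  | cons p P ih =>
    simp only [PySem.Set.update, List.foldl_cons, pvNews]
    by_cases h : PySem.Set.contains s p = true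
    · rw [if_pos h, pv_add_of_contains s p h, ← PySem.Set.update]
      exact ih s
    · rw [if_neg h, ← PySem.Set.update, ih (PySem.Set.add s p)]
      rw [pv_add_of_not_contains s p h, List.append_assoc, List.singleton_append]

theorem pv_B_items (text : List String) (n : Int) :
    count_continuations_alt text n
      = (PySem.Set.ofList ((PySem.Set.ofList (pvL text n)).map Prod.fst)).map
          (fun c => (c, ((((PySem.Set.ofList (pvL text n)).map Prod.fst).count c : Int)))) := by
  show ((PySem.List.pyRange 0 ((text.length : Int) - n + 1) 1).foldl
      (fun st i => pvStepB st (pvPair text n i)) (PySem.Set.empty, PySem.Dict.empty)).2.items = _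
  rw [← List.foldl_map (f := pvPair text n) (g := pvStepB) (init := (PySem.Set.empty, PySem.Dict.empty))]
  rw [show (PySem.List.pyRange 0 ((text.length : Int) - n + 1) 1).map (pvPair text n) = pvL text n from rfl]
  rw [pv_B_split]
  have hnews : pvNews (pvL text n) PySem.Set.empty = PySem.Set.ofList (pvL text n) := by
    have := pv_update_eq_append_news (pvL text n) PySem.Set.empty
    simpa [PySem.Set.update, PySem.Set.empty, PySem.Set.ofList_eq_foldl] using this.symm
  rw [hnews]
  rw [show ∀ (q : PySem.Set (List String × String) × PySem.Dict (List String) Int), q.2 = Prod.snd q from fun _ => rfl]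
  have h2 : ((PySem.Set.ofList (pvL text n)).foldl (fun d p => d.modify p.1 0 (· + 1)) PySem.Dict.empty)
      = PySem.Dict.counter ((PySem.Set.ofList (pvL text n)).map Prod.fst) := by
    rw [PySem.Dict.counter_eq_foldl, List.foldl_map]
  rw [h2]
  exact PySem.Dict.items_counter _

theorem pv_ofList_map_ofList (P : List (List String × String)) :
    PySem.Set.ofList ((PySem.Set.ofList P).map Prod.fst) = PySem.Set.ofList (P.map Prod.fst) := by
  induction P using List.reverseRecOn with
  | nil => rfl
  | append_singleton P x ih =>
    rw [List.map_append, List.map_singleton]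
    rw [pv_ofList_snoc P x, pv_ofList_snoc (P.map Prod.fst) x.1]
    by_cases h : x ∈ PySem.Set.ofList P
    · rw [pv_add_of_mem _ _ h, ih]
      have hx1 : x.1 ∈ PySem.Set.ofList (P.map Prod.fst) := by
        rw [PySem.Set.mem_ofList]
        exact List.mem_map_of_mem ((PySem.Set.mem_ofList P x).mp h)
      rw [pv_add_of_mem _ _ hx1]
    · rw [pv_add_of_not_mem _ _ h, List.map_append, List.map_singleton,
        pv_ofList_snoc ((PySem.Set.ofList P).map Prod.fst) x.1, ih]

theorem pv_filter_foldl_add (q : (List String × String) → Bool) (P : List (List String × String))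
    (s : PySem.Set (List String × String)) :
    (P.foldl PySem.Set.add s).filter q = (P.filter q).foldl PySem.Set.add (s.filter q) := by
  induction P generalizing s with
  | nil => rfl
  | cons p P ih =>
    rw [List.foldl_cons, ih, List.filter_cons]
    by_cases hq : q p = true
    · rw [if_pos hq, List.foldl_cons]
      congr 1
      by_cases hm : p ∈ s
      · rw [pv_add_of_mem _ _ hm, pv_add_of_mem _ _ (List.mem_filter.mpr ⟨hm, hq⟩)]
      · rw [pv_add_of_not_mem _ _ hm, pv_add_of_not_mem _ _ (fun hx => hm (List.mem_filter.mp hx).1),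
            List.filter_append, List.filter_cons, if_pos hq, List.filter_nil]
    · rw [if_neg hq]
      congr 1
      by_cases hm : p ∈ s
      · rw [pv_add_of_mem _ _ hm]
      · rw [pv_add_of_not_mem _ _ hm, List.filter_append, List.filter_cons, if_neg hq,
            List.filter_nil, List.append_nil]

theorem pv_ofList_filter (q : (List String × String) → Bool) (P : List (List String × String)) :
    (PySem.Set.ofList P).filter q = PySem.Set.ofList (P.filter q) := by
  have := pv_filter_foldl_add q P PySem.Set.empty
  simpa [PySem.Set.ofList_eq_foldl, PySem.Set.empty] using this

theorem pv_map_snd_foldl_add (c : List String) (R : List (List String × String))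
    (s : PySem.Set (List String × String)) (hs : ∀ p ∈ s, p.1 = c) (hR : ∀ p ∈ R, p.1 = c) :
    (R.foldl PySem.Set.add s).map Prod.snd = (R.map Prod.snd).foldl PySem.Set.add (s.map Prod.snd) := by
  induction R generalizing s with
  | nil => rfl
  | cons p R ih =>
    rw [List.foldl_cons, List.map_cons, List.foldl_cons]
    have hpc : p.1 = c := hR p List.mem_cons_self
    by_cases hm : p ∈ s
    · rw [pv_add_of_mem _ _ hm, pv_add_of_mem (s.map Prod.snd) p.2 (List.mem_map_of_mem hm)]
      exact ih s hs (fun a ha => hR a (List.mem_cons_of_mem _ ha))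
    · have h2 : ¬ p.2 ∈ s.map Prod.snd := by
        intro hx
        obtain ⟨a, ha, hae⟩ := List.mem_map.mp hx
        apply hm
        have : a = p := Prod.ext ((hs a ha).trans hpc.symm) hae
        rwa [this] at ha
      rw [pv_add_of_not_mem _ _ hm, pv_add_of_not_mem (s.map Prod.snd) p.2 h2]
      have hs' : ∀ a ∈ s ++ [p], a.1 = c := by
        intro a ha
        rcases List.mem_append.mp ha with h | h
        · exact hs a h
        · rw [List.mem_singleton.mp h]; exact hpc
      rw [ih (s ++ [p]) hs' (fun a ha => hR a (List.mem_cons_of_mem _ ha))]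
      simp

theorem pv_value_eq (P : List (List String × String)) (c : List String) :
    ((PySem.Set.ofList (((P.filter (fun p => p.1 == c)).map Prod.snd) : List String)).length : Int)
      = (((PySem.Set.ofList P).map Prod.fst).count c : Int) := by
  have hR : ∀ p ∈ P.filter (fun p => p.1 == c), p.1 = c := by
    intro p hp
    exact beq_iff_eq.mp (List.mem_filter.mp hp).2
  have h1 : PySem.Set.ofList ((P.filter (fun p => p.1 == c)).map Prod.snd)
      = (PySem.Set.ofList (P.filter (fun p => p.1 == c))).map Prod.snd := by
    have := pv_map_snd_foldl_add c (P.filter (fun p => p.1 == c)) PySem.Set.empty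
      (by intro p hp; simp [PySem.Set.empty] at hp) hR
    simpa [PySem.Set.ofList_eq_foldl, PySem.Set.empty] using this.symm
  rw [h1, List.length_map, ← pv_ofList_filter]
  have h2 : ((PySem.Set.ofList P).map Prod.fst).count c
      = ((PySem.Set.ofList P).filter (fun p => p.1 == c)).length := by
    rw [List.count_eq_countP, List.countP_map, List.countP_eq_length_filter]
    rfl
  rw [h2]

-- ===== VERDICT (by name: the statement is the Claim_ definition above) =====
theorem count_continuations_spec : Claim_equal_count_continuations := by
  intro text n _ _
  unfold Spec_count_continuations
  rw [pv_A_items, pv_B_items, pv_ofList_map_ofList]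
  exact List.map_congr_left (fun c _ => by rw [pv_value_eq])
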